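-- pv_equiv track=rewrite | github.com/petrbras17-hue/neurocommerci | core/persona_engine.py | _nearest_peak_hour
-- ===== SOURCE A (Python) =====
-- def _nearest_peak_hour(current_minutes: int, peak_hours: list[int]) -> int:
--     """
--     Возвращает peak_hour, ближайший к текущему времени (в будущем).
--     """
--     future_peaks = []
--     for h in peak_hours:
--         peak_min = h * 60
--         if peak_min > current_minutes:
--             future_peaks.append((peak_min - current_minutes, h))
--     if not future_peaks:
--         # Все в прошлом — берём первый завтра
--         h = min(peak_hours)
--         future_peaks.append((h * 60 + 24 * 60 - current_minutes, h))
--     future_peaks.sort()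
--     return future_peaks[0][1]
-- ===== SOURCE B (Python) =====
-- def _nearest_peak_hour(current_minutes: int, peak_hours: list[int]) -> int:
--     # Single pass: future peaks (h*60 > now) sort before past ones, nearest first;
--     # among past-only peaks the smallest hour wins (it is the first one tomorrow).
--     return min(
--         peak_hours,
--         key=lambda h: (0, h * 60 - current_minutes) if h * 60 > current_minutes else (1, h),
--     )
-- ===== Notes on version B (the rewrite author's own statement) =====
-- stated objective: simpler
-- what changed: Replaces A's build-a-pair-list + fallback-append + sort + take-head with a single min() pass over peak_hours using a (future?, distance-or-hour) tuple key, so no intermediate list, no sort and no separate all-in-the-past branch.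
import Mathlib
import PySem

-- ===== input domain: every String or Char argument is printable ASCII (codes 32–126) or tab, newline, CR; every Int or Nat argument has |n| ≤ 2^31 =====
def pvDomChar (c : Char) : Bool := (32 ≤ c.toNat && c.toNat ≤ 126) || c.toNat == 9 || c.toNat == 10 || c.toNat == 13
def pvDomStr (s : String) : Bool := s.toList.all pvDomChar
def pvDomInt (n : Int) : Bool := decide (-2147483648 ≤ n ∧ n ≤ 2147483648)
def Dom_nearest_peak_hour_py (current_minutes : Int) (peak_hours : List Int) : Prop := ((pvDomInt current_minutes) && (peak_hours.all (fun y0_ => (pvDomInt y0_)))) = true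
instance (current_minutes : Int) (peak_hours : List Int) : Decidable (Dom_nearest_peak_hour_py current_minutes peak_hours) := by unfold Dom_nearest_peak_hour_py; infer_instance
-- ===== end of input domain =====

-- B replaces A's filter-build-append-sort with one min() pass using a (future?, distance/hour) key; objective: simpler (and one pass).

-- ===== PORT A =====
def nearest_peak_hour_py (current_minutes : Int) (peak_hours : List Int) : Int :=
  let future_peaks : List (Int × Int) :=
    peak_hours.foldl (fun acc h =>
      if h * 60 > current_minutes then acc ++ [(h * 60 - current_minutes, h)] else acc) []
  let future_peaks2 : List (Int × Int) :=
    if future_peaks = [] then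
      match PySem.List.min? peak_hours (fun x => x) with
      | some h => future_peaks ++ [(h * 60 + 24 * 60 - current_minutes, h)]
      | none => []  -- Python: min([]) raises ValueError; excluded by Pre_
    else future_peaks
  match PySem.List.pyGet? (PySem.List.sorted2 future_peaks2 (fun p => p.1) (fun p => p.2)) 0 with
  | some p => p.2
  | none => 0  -- unreachable under Pre_ (peak_hours ≠ [])

-- ===== PORT B =====
def nearest_peak_hour_py_alt (current_minutes : Int) (peak_hours : List Int) : Int :=
  match PySem.List.min2? peak_hours
      (fun h => if h * 60 > current_minutes then (0 : Int) else 1)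
      (fun h => if h * 60 > current_minutes then h * 60 - current_minutes else h) with
  | some b => b
  | none => 0  -- Python: min([]) raises ValueError; excluded by Pre_

-- ===== PRECONDITION & SPEC =====
-- Pre_ excludes only the empty list, on which A (and B) raise ValueError in min().
def Pre_nearest_peak_hour_py (current_minutes : Int) (peak_hours : List Int) : Prop := peak_hours ≠ []
instance (current_minutes : Int) (peak_hours : List Int) : Decidable (Pre_nearest_peak_hour_py current_minutes peak_hours) := by unfold Pre_nearest_peak_hour_py; infer_instance
def pvWitness_nearest_peak_hour_py : Int × List Int := (480, [7, 12, 20])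

def Spec_nearest_peak_hour_py (current_minutes : Int) (peak_hours : List Int) (out : Int) : Prop := out = nearest_peak_hour_py_alt current_minutes peak_hours
instance (current_minutes : Int) (peak_hours : List Int) (out : Int) : Decidable (Spec_nearest_peak_hour_py current_minutes peak_hours out) := by unfold Spec_nearest_peak_hour_py; infer_instance

-- ===== CLAIM (what is proved, stated in full; the proofs are below) =====
def Claim_equal_nearest_peak_hour_py : Prop := ∀ (current_minutes : Int) (peak_hours : List Int), Dom_nearest_peak_hour_py current_minutes peak_hours → Pre_nearest_peak_hour_py current_minutes peak_hours → Spec_nearest_peak_hour_py current_minutes peak_hours (nearest_peak_hour_py current_minutes peak_hours)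

-- ===== LEMMAS AND PROOFS =====
-- lex-≤ on Int pairs (Python tuple comparison), used to state min2?'s minimality
def pvLle (a b : Int × Int) : Prop := a.1 < b.1 ∨ (a.1 = b.1 ∧ a.2 ≤ b.2)

lemma pvLle_trans {a b c : Int × Int} (h1 : pvLle a b) (h2 : pvLle b c) : pvLle a c := by
  obtain ⟨a1, a2⟩ := a; obtain ⟨b1, b2⟩ := b; obtain ⟨c1, c2⟩ := c
  unfold pvLle at *; dsimp at *; omega

lemma pvMin2Step (k1 k2 : Int → Int) (m x : Int) (t : List Int) :
    PySem.List.min2? (m :: x :: t) k1 k2 =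
      PySem.List.min2? ((if (decide (k1 x < k1 m) || !decide (k1 m < k1 x) && decide (k2 x < k2 m)) = true then x else m) :: t) k1 k2 := by
  simp only [PySem.List.min2?, List.foldl_cons]
  congr 1
  split <;> rfl

lemma pvMin2Spec (k1 k2 : Int → Int) :
    ∀ (t : List Int) (m : Int),
      ∃ b, PySem.List.min2? (m :: t) k1 k2 = some b ∧ b ∈ m :: t ∧
        ∀ y ∈ m :: t, pvLle (k1 b, k2 b) (k1 y, k2 y) := by
  intro t
  induction t with
  | nil =>
    intro m
    refine ⟨m, rfl, List.mem_cons_self .., ?_⟩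
    intro y hy
    rw [List.mem_singleton] at hy
    subst hy
    exact Or.inr ⟨rfl, le_refl _⟩
  | cons x t ih =>
    intro m
    rw [pvMin2Step]
    by_cases hc : (decide (k1 x < k1 m) || !decide (k1 m < k1 x) && decide (k2 x < k2 m)) = true
    · rw [if_pos hc]
      obtain ⟨b, hb, hbmem, hball⟩ := ih x
      have hxm : pvLle (k1 x, k2 x) (k1 m, k2 m) := by
        simp only [Bool.or_eq_true, Bool.and_eq_true, Bool.not_eq_true', decide_eq_true_eq,
          decide_eq_false_iff_not] at hc
        unfold pvLle; dsimp; omega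
      refine ⟨b, hb, ?_, ?_⟩
      · rcases List.mem_cons.mp hbmem with h | h
        · exact List.mem_cons.mpr (Or.inr (h ▸ List.mem_cons_self ..))
        · exact List.mem_cons.mpr (Or.inr (List.mem_cons.mpr (Or.inr h)))
      · intro y hy
        rcases List.mem_cons.mp hy with h | h
        · exact h ▸ pvLle_trans (hball x (List.mem_cons_self ..)) hxm
        · exact hball y h
    · rw [if_neg hc]
      obtain ⟨b, hb, hbmem, hball⟩ := ih m
      have hmx : pvLle (k1 m, k2 m) (k1 x, k2 x) := by
        simp only [Bool.or_eq_true, Bool.and_eq_true, Bool.not_eq_true', decide_eq_true_eq,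
          decide_eq_false_iff_not] at hc
        unfold pvLle; dsimp; omega
      refine ⟨b, hb, ?_, ?_⟩
      · rcases List.mem_cons.mp hbmem with h | h
        · exact List.mem_cons.mpr (Or.inl h)
        · exact List.mem_cons.mpr (Or.inr (List.mem_cons.mpr (Or.inr h)))
      · intro y hy
        rcases List.mem_cons.mp hy with h | h
        · exact h ▸ hball m (List.mem_cons_self ..)
        · rcases List.mem_cons.mp h with h' | h'
          · exact h' ▸ pvLle_trans (hball m (List.mem_cons_self ..)) hmx
          · exact hball y (List.mem_cons.mpr (Or.inr h'))

lemma pvInsertBy_cons {α : Type} (b : α → α → Bool) (x y : α) (ys : List α) :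
    PySem.List.insertBy b x (y :: ys) =
      if b x y then x :: y :: ys else y :: PySem.List.insertBy b x ys := by
  simp [PySem.List.insertBy]

lemma pvInsertBy_congr {α : Type} (b1 b2 : α → α → Bool) (P : α → Prop)
    (hb : ∀ a c, P a → P c → b1 a c = b2 a c) (x : α) (hx : P x) :
    ∀ ys : List α, (∀ y ∈ ys, P y) →
      PySem.List.insertBy b1 x ys = PySem.List.insertBy b2 x ys := by
  intro ys
  induction ys with
  | nil => intro _; rfl
  | cons y ys ih =>
    intro hys
    rw [pvInsertBy_cons, pvInsertBy_cons, hb x y hx (hys y (List.mem_cons_self ..))]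
    split
    · rfl
    · rw [ih (fun z hz => hys z (List.mem_cons.mpr (Or.inr hz)))]

lemma pvFoldl_insertBy_congr {α : Type} (b1 b2 : α → α → Bool) (P : α → Prop)
    (hb : ∀ a c, P a → P c → b1 a c = b2 a c) :
    ∀ (xs acc : List α), (∀ x ∈ xs, P x) → (∀ x ∈ acc, P x) →
      xs.foldl (fun a x => PySem.List.insertBy b1 x a) acc =
      xs.foldl (fun a x => PySem.List.insertBy b2 x a) acc := by
  intro xs
  induction xs with
  | nil => intro acc _ _; rfl
  | cons x xs ih =>
    intro acc hxs hacc
    simp only [List.foldl_cons]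
    rw [pvInsertBy_congr b1 b2 P hb x (hxs x (List.mem_cons_self ..)) acc hacc]
    refine ih _ (fun z hz => hxs z (List.mem_cons.mpr (Or.inr hz))) ?_
    intro z hz
    rcases (PySem.List.mem_insertBy _ _ _ _).mp hz with h | h
    · exact h ▸ hxs x (List.mem_cons_self ..)
    · exact hacc z h

lemma pvSorted2_eq_sorted (cm : Int) (fp : List (Int × Int))
    (hP : ∀ p ∈ fp, p.1 = p.2 * 60 - cm) :
    PySem.List.sorted2 fp (fun p => p.1) (fun p => p.2) =
      PySem.List.sorted fp (fun p => p.2) := by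
  show fp.foldl (fun a x => PySem.List.insertBy
        (fun p q => decide (p.1 < q.1) || !decide (q.1 < p.1) && decide (p.2 < q.2)) x a) [] =
      fp.foldl (fun a x => PySem.List.insertBy (fun p q => decide (p.2 < q.2)) x a) []
  refine pvFoldl_insertBy_congr _ _ (fun p => p.1 = p.2 * 60 - cm) ?_ fp [] hP (by simp)
  intro a c ha hc
  obtain ⟨a1, a2⟩ := a; obtain ⟨c1, c2⟩ := c
  dsimp at ha hc ⊢
  subst ha; subst hc
  by_cases h : a2 < c2
  · simp [h, show a2 * 60 - cm < c2 * 60 - cm by omega]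
  · simp [h, show ¬(a2 * 60 - cm < c2 * 60 - cm) by omega]

-- ===== VERDICT (by name: the statement is the Claim_ definition above) =====
theorem nearest_peak_hour_py_spec : Claim_equal_nearest_peak_hour_py := by
  intro cm peaks _ hpre
  unfold Spec_nearest_peak_hour_py
  cases peaks with
  | nil => exact absurd rfl hpre
  | cons p l =>
  -- B's side: the single min2? pass
  obtain ⟨b, hb, hbmem, hball⟩ :=
    pvMin2Spec (fun h => if h * 60 > cm then (0 : Int) else 1)
      (fun h => if h * 60 > cm then h * 60 - cm else h) l p
  have haltb : nearest_peak_hour_py_alt cm (p :: l) = b := by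
    unfold nearest_peak_hour_py_alt
    rw [hb]
  rw [haltb]
  -- A's side: characterise the built list
  have hfp : (p :: l).foldl
      (fun acc h => if h * 60 > cm then acc ++ [(h * 60 - cm, h)] else acc) ([] : List (Int × Int))
      = ((p :: l).filter (fun h => decide (h * 60 > cm))).map (fun h => (h * 60 - cm, h)) := by
    simpa using PySem.List.foldl_append_ite (p := fun h => h * 60 > cm)
      (f := fun h => (h * 60 - cm, h)) (l := p :: l) (acc := [])
  unfold nearest_peak_hour_py
  simp only [hfp]
  by_cases hF : (p :: l).filter (fun h => decide (h * 60 > cm)) = []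
  -- every peak is in the past
  · have hnofut : ∀ y ∈ p :: l, ¬ (y * 60 > cm) := by
      intro y hy hgt
      have := List.filter_eq_nil_iff.mp hF y hy
      simp [hgt] at this
    rw [hF]
    simp only [List.map_nil]
    rw [if_pos trivial]
    obtain ⟨hmin, hm⟩ : ∃ hmin, PySem.List.min? (p :: l) (fun x => x) = some hmin := by
      cases h : PySem.List.min? (p :: l) (fun x => x) with
      | none => exact absurd ((PySem.List.min?_eq_none_iff _ _).mp h) (List.cons_ne_nil p l)
      | some v => exact ⟨v, rfl⟩
    have hm_mem : hmin ∈ p :: l := PySem.List.min?_mem hm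
    have hm_min : ∀ y ∈ p :: l, hmin ≤ y := PySem.List.min?_isMin hm
    rw [hm]
    show (match PySem.List.pyGet? (PySem.List.sorted2 [(hmin * 60 + 24 * 60 - cm, hmin)]
        (fun p => p.1) (fun p => p.2)) 0 with
      | some q => q.2
      | none => 0) = b
    have hone : PySem.List.sorted2 [(hmin * 60 + 24 * 60 - cm, hmin)]
        (fun p => p.1) (fun p => p.2) = [(hmin * 60 + 24 * 60 - cm, hmin)] := rfl
    rw [hone]
    have hget : PySem.List.pyGet? [(hmin * 60 + 24 * 60 - cm, hmin)] 0
        = some (hmin * 60 + 24 * 60 - cm, hmin) := by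
      simp [PySem.List.pyGet?, PySem.List.pyIdx?]
    rw [hget]
    -- both sides are the minimum element of the list
    have hb_le : b ≤ hmin := by
      have := hball hmin hm_mem
      simp only [if_neg (hnofut hmin hm_mem), if_neg (hnofut b hbmem)] at this
      unfold pvLle at this; dsimp at this; omega
    exact le_antisymm (hm_min b hbmem) hb_le
  -- some peak is in the future
  · rw [if_neg (by simpa [List.map_eq_nil_iff] using hF)]
    have hP : ∀ q ∈ ((p :: l).filter (fun h => decide (h * 60 > cm))).map
        (fun h => (h * 60 - cm, h)), q.1 = q.2 * 60 - cm := by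
      intro q hq
      obtain ⟨h, _, rfl⟩ := List.mem_map.mp hq
      rfl
    rw [pvSorted2_eq_sorted cm _ hP]
    obtain ⟨q, s, hs⟩ : ∃ q s, PySem.List.sorted
        (((p :: l).filter (fun h => decide (h * 60 > cm))).map (fun h => (h * 60 - cm, h)))
        (fun p => p.2) = q :: s := by
      cases h : PySem.List.sorted _ (fun p : Int × Int => p.2) with
      | nil =>
        exact absurd (by simpa [List.map_eq_nil_iff] using (PySem.List.sorted_eq_nil_iff _ _ _).mp h) hF
      | cons q s => exact ⟨q, s, rfl⟩
    rw [hs]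
    have hget : PySem.List.pyGet? (q :: s) 0 = some q := by
      simp [PySem.List.pyGet?, PySem.List.pyIdx?]
    rw [hget]
    show q.2 = b
    -- q.2 is a minimal element of the future peaks
    have hq_mem : q ∈ ((p :: l).filter (fun h => decide (h * 60 > cm))).map
        (fun h => (h * 60 - cm, h)) := by
      rw [← PySem.List.mem_sorted _ (fun p : Int × Int => p.2) false, hs]
      exact List.mem_cons_self ..
    have hq_min : ∀ y ∈ ((p :: l).filter (fun h => decide (h * 60 > cm))).map
        (fun h => (h * 60 - cm, h)), q.2 ≤ y.2 :=
      PySem.List.key_head_sorted_le _ _ hs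
    obtain ⟨hq, hq_filt, hq_eq⟩ := List.mem_map.mp hq_mem
    have hq2 : q.2 = hq := by rw [← hq_eq]
    have hq_fut : hq * 60 > cm := by
      have := (List.mem_filter.mp hq_filt).2
      simpa using this
    have hq_in : hq ∈ p :: l := (List.mem_filter.mp hq_filt).1
    -- b is a future peak
    have hb_fut : b * 60 > cm := by
      by_contra hbn
      have := hball hq hq_in
      simp only [if_pos hq_fut, if_neg hbn] at this
      unfold pvLle at this; dsimp at this; omega
    -- b is minimal among future peaks: q.2 ≤ b and b ≤ q.2
    have hq_le_b : q.2 ≤ b := by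
      have hbm : (b * 60 - cm, b) ∈ ((p :: l).filter (fun h => decide (h * 60 > cm))).map
          (fun h => (h * 60 - cm, h)) :=
        List.mem_map.mpr ⟨b, List.mem_filter.mpr ⟨hbmem, by simpa using hb_fut⟩, rfl⟩
      simpa using hq_min _ hbm
    have hb_le_q : b ≤ q.2 := by
      have := hball hq hq_in
      simp only [if_pos hq_fut, if_pos hb_fut] at this
      unfold pvLle at this; dsimp at this
      omega
    omega
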